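-- pv_equiv track=rewrite | github.com/nibudd/advent-of-code | day5.py | parse_raw_data
-- ===== SOURCE A (Python) =====
-- def parse_raw_data(data: list[str]) -> tuple[list[str]]:
--     stack_data, move_data = [], []
--     fill_stack = True
--     for line in data:
--         if line == "":
--             fill_stack = False
--
--         elif fill_stack:
--             stack_data.append(line)
--
--         else:
--             move_data.append(line)
--
--     return stack_data, move_data
-- ===== SOURCE B (Python) =====
-- def parse_raw_data(data: list[str]) -> tuple[list[str]]:
--     try:
--         i = data.index("")
--     except ValueError:
--         i = len(data)
--     stack_data = data[:i]
--     move_data = [l for l in data[i + 1:] if l != ""]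
--     return stack_data, move_data
-- ===== Notes on version B (the rewrite author's own statement) =====
-- stated objective: alternative
-- what changed: Replaces the per-line flag-and-branch pass with finding the first blank line's index and then slicing the stack section and filtering the remainder for the move section.
import Mathlib
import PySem

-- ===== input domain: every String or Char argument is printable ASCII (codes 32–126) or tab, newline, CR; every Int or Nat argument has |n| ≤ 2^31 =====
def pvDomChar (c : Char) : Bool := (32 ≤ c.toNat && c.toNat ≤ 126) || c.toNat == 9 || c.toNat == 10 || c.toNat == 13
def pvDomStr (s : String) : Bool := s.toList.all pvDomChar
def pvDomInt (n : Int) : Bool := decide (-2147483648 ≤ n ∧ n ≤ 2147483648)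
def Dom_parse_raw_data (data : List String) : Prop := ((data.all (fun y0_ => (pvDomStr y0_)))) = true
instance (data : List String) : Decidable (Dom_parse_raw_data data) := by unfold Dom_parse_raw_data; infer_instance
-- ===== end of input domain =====

-- B replaces A's flag-and-branch single pass by locating the first blank line and slicing/filtering (alternative decomposition, same cost).

-- ===== PORT A =====
-- step of A's for-loop: state = (stack_data, move_data, fill_stack)
def pvStepA (acc : List String × List String × Bool) (line : String) :
    List String × List String × Bool :=
  if line = "" then (acc.1, acc.2.1, false)
  else if acc.2.2 then (acc.1 ++ [line], acc.2.1, acc.2.2)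
  else (acc.1, acc.2.1 ++ [line], acc.2.2)

def parse_raw_data (data : List String) : List String × List String :=
  let st := data.foldl pvStepA ([], [], true)
  (st.1, st.2.1)

-- ===== PORT B =====
def parse_raw_data_alt (data : List String) : List String × List String :=
  let i : Int :=
    match PySem.List.index? data "" with
    | some k => (k : Int)        -- data.index("")
    | none => (data.length : Int) -- except ValueError: i = len(data)
  (PySem.List.slice data none (some i),
   (PySem.List.slice data (some (i + 1)) none).filter (fun l => l ≠ ""))

-- ===== PRECONDITION & SPEC =====
def Spec_parse_raw_data (data : List String) (out : List String × List String) : Prop := out = parse_raw_data_alt data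
instance (data : List String) (out : List String × List String) : Decidable (Spec_parse_raw_data data out) := by unfold Spec_parse_raw_data; infer_instance

-- ===== CLAIM (what is proved, stated in full; the proofs are below) =====
def Claim_equal_parse_raw_data : Prop := ∀ (data : List String), Dom_parse_raw_data data → Spec_parse_raw_data data (parse_raw_data data)

-- ===== LEMMAS AND PROOFS =====

theorem pvFoldFalse (t : List String) (s m : List String) :
    t.foldl pvStepA (s, m, false) = (s, m ++ t.filter (fun l => l ≠ ""), false) := by
  induction t generalizing m with
  | nil => simp
  | cons h t ih =>
      by_cases hh : h = "" <;>
        simp [pvStepA, hh, List.filter, ih]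

theorem pvStepA_true (h : String) (s m : List String) (hh : h ≠ "") :
    pvStepA (s, m, true) h = (s ++ [h], m, true) := by
  simp [pvStepA, hh]

theorem pvFoldTrue (t : List String) (s m : List String) :
    t.foldl pvStepA (s, m, true) =
      (s ++ (t.foldl pvStepA ([], [], true)).1,
       m ++ (t.foldl pvStepA ([], [], true)).2.1,
       (t.foldl pvStepA ([], [], true)).2.2) := by
  induction t generalizing s m with
  | nil => simp
  | cons h t ih =>
      by_cases hh : h = ""
      · simp [pvStepA, hh, pvFoldFalse]
      · simp only [List.foldl_cons, pvStepA_true _ _ _ hh]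
        rw [ih (s ++ [h]) m, ih ([] ++ [h]) []]
        simp

theorem pvA_cons_blank (t : List String) :
    parse_raw_data ("" :: t) = ([], t.filter (fun l => l ≠ "")) := by
  simp [parse_raw_data, pvStepA, pvFoldFalse]

theorem pvA_cons_ne (h : String) (t : List String) (hh : h ≠ "") :
    parse_raw_data (h :: t) = (h :: (parse_raw_data t).1, (parse_raw_data t).2) := by
  simp only [parse_raw_data, List.foldl_cons, pvStepA_true _ _ _ hh]
  rw [pvFoldTrue t ([] ++ [h]) []]
  simp

theorem pvB_cons_blank (t : List String) :
    parse_raw_data_alt ("" :: t) = ([], t.filter (fun l => l ≠ "")) := by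
  unfold parse_raw_data_alt
  rw [PySem.List.index?_cons_self]
  simp only [Nat.cast_zero, zero_add]
  rw [PySem.List.slice_to _ (by norm_num : (0:Int) ≤ 0),
    PySem.List.slice_from _ (by norm_num : (0:Int) ≤ 1)]
  norm_num

theorem pvB_cons_ne (h : String) (t : List String) (hh : h ≠ "") :
    parse_raw_data_alt (h :: t) =
      (h :: (parse_raw_data_alt t).1, (parse_raw_data_alt t).2) := by
  have hidx := PySem.List.index?_cons_of_ne (x := h) (v := "") t hh
  cases hk : PySem.List.index? t "" with
  | some k =>
      simp only [parse_raw_data_alt, hidx, hk, Option.map_some]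
      rw [show ((k + 1 : Nat) : Int) + 1 = ((k + 2 : Nat) : Int) by push_cast; ring,
        show ((k : Nat) : Int) + 1 = ((k + 1 : Nat) : Int) by push_cast; ring,
        PySem.List.slice_to_natCast, PySem.List.slice_from_natCast,
        PySem.List.slice_to_natCast, PySem.List.slice_from_natCast]
      simp [List.take_succ_cons]
  | none =>
      simp only [parse_raw_data_alt, hidx, hk, Option.map_none, List.length_cons]
      rw [show ((t.length + 1 : Nat) : Int) + 1 = ((t.length + 2 : Nat) : Int) by push_cast; ring,
        show ((t.length : Nat) : Int) + 1 = ((t.length + 1 : Nat) : Int) by push_cast; ring,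
        PySem.List.slice_to_natCast, PySem.List.slice_from_natCast,
        PySem.List.slice_to_natCast, PySem.List.slice_from_natCast]
      simp [List.take_of_length_le]

theorem pvEq (data : List String) : parse_raw_data data = parse_raw_data_alt data := by
  induction data with
  | nil => rfl
  | cons h t ih =>
      by_cases hh : h = ""
      · subst hh; rw [pvA_cons_blank, pvB_cons_blank]
      · rw [pvA_cons_ne h t hh, pvB_cons_ne h t hh, ih]

-- ===== VERDICT (by name: the statement is the Claim_ definition above) =====
theorem parse_raw_data_spec : Claim_equal_parse_raw_data := by
  intro data _
  exact pvEq data
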